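-- pv_equiv track=rewrite | github.com/gaigechunfengchumandi/chishan | utils/segment_500hz/segment_500hz_openvino.py | split_wave_regions
-- ===== SOURCE A (Python) =====
-- def split_wave_regions(data_lead_x, noise_value=-10):
--     regions = []
--     current_region = []
--
--     for i, value in enumerate(data_lead_x):
--         if value != noise_value:
--             # If the current value is part of the x-wave, add it to the current region
--             current_region.append((i, value))
--         else:
--             # If we encounter a noise value and the current region is not empty,
--             # save the current region and reset it
--             if current_region:
--                 regions.append(current_region)
--                 current_region = []
--
--     # Append the last region if it exists
--     if current_region:
--         regions.append(current_region)
--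
--     return regions
-- ===== SOURCE B (Python) =====
-- from itertools import groupby
--
--
-- def split_wave_regions(data_lead_x, noise_value=-10):
--     return [list(g)
--             for k, g in groupby(enumerate(data_lead_x),
--                                 key=lambda iv: iv[1] != noise_value)
--             if k]
-- ===== Notes on version B (the rewrite author's own statement) =====
-- stated objective: idiomatic
-- what changed: Replaced the explicit accumulator loop with boundary-flush logic by a single itertools.groupby over enumerate, keeping only the non-noise groups.
import Mathlib
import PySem

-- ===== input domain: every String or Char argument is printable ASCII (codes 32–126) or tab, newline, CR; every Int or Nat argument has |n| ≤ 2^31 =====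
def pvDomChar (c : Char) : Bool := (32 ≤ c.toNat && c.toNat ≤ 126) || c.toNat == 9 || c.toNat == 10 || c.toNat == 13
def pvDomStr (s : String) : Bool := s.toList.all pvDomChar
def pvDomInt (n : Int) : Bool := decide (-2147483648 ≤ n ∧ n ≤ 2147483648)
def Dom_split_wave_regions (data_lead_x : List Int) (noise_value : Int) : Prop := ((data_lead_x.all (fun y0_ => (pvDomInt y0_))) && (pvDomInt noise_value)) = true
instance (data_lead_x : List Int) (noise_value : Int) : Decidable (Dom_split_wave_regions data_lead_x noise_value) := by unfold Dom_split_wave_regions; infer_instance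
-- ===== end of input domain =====

-- B replaces A's explicit accumulator loop with boundary-flush logic by a groupby over
-- enumerate(data), keeping the non-noise groups (objective: idiomatic; same O(n) cost).

-- ===== PORT A =====
-- accumulator loop: state = (regions, current_region), final flush of the last region
def split_wave_regions (data_lead_x : List Int) (noise_value : Int) : List (List (Int × Int)) :=
  let st := (PySem.List.enumerate data_lead_x).foldl
    (fun (st : List (List (Int × Int)) × List (Int × Int)) p =>
      if p.2 ≠ noise_value then (st.1, st.2 ++ [p])
      else if st.2 ≠ [] then (st.1 ++ [st.2], ([] : List (Int × Int)))
      else st)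
    ([], [])
  if st.2 ≠ [] then st.1 ++ [st.2] else st.1

-- ===== PORT B =====
-- the groupby key: iv[1] != noise_value
def pvKeyB (noise_value : Int) (p : Int × Int) : Bool := decide (p.2 ≠ noise_value)

-- itertools.groupby over the enumerated pairs: each step spans the run of equal keys
def pvGroupsB (noise_value : Int) : List (Int × Int) → List (List (Int × Int))
  | [] => []
  | p :: rest =>
    let s := rest.span (fun q => pvKeyB noise_value q == pvKeyB noise_value p)
    if pvKeyB noise_value p then (p :: s.1) :: pvGroupsB noise_value s.2
    else pvGroupsB noise_value s.2
termination_by l => l.length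
decreasing_by
  all_goals
    simp only [List.span_eq_takeWhile_dropWhile]
    exact Nat.lt_succ_of_le (List.length_dropWhile_le _ _)

def split_wave_regions_alt (data_lead_x : List Int) (noise_value : Int) : List (List (Int × Int)) :=
  pvGroupsB noise_value (PySem.List.enumerate data_lead_x)

-- ===== PRECONDITION & SPEC =====
def Spec_split_wave_regions (data_lead_x : List Int) (noise_value : Int) (out : List (List (Int × Int))) : Prop := out = split_wave_regions_alt data_lead_x noise_value
instance (data_lead_x : List Int) (noise_value : Int) (out : List (List (Int × Int))) : Decidable (Spec_split_wave_regions data_lead_x noise_value out) := by unfold Spec_split_wave_regions; infer_instance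

-- ===== CLAIM (what is proved, stated in full; the proofs are below) =====
def Claim_equal_split_wave_regions : Prop := ∀ (data_lead_x : List Int) (noise_value : Int), Dom_split_wave_regions data_lead_x noise_value → Spec_split_wave_regions data_lead_x noise_value (split_wave_regions data_lead_x noise_value)

-- ===== LEMMAS AND PROOFS =====

-- proof-side recursive characterisation of A's loop, with the current region as parameter
def pvAux (noise_value : Int) : List (Int × Int) → List (Int × Int) → List (List (Int × Int))
  | cur, [] => if cur = [] then [] else [cur]
  | cur, p :: rest =>
    if p.2 ≠ noise_value then pvAux noise_value (cur ++ [p]) rest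
    else if cur = [] then pvAux noise_value [] rest
    else cur :: pvAux noise_value [] rest

-- A's foldl + final flush equals pvAux
theorem pvA_eq_aux (nv : Int) (l : List (Int × Int)) :
    ∀ (regs : List (List (Int × Int))) (cur : List (Int × Int)),
    (let st := l.foldl
      (fun (st : List (List (Int × Int)) × List (Int × Int)) p =>
        if p.2 ≠ nv then (st.1, st.2 ++ [p])
        else if st.2 ≠ [] then (st.1 ++ [st.2], ([] : List (Int × Int)))
        else st)
      (regs, cur);
     if st.2 ≠ [] then st.1 ++ [st.2] else st.1) = regs ++ pvAux nv cur l := by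
  induction l with
  | nil =>
    intro regs cur
    by_cases h : cur = [] <;> simp [pvAux, h]
  | cons p rest ih =>
    intro regs cur
    by_cases hp : p.2 ≠ nv
    · simpa [pvAux, hp] using ih regs (cur ++ [p])
    · have hp' : p.2 = nv := not_not.mp hp
      by_cases hc : cur = []
      · simpa [pvAux, hp', hc] using ih regs cur
      · simpa [pvAux, hp', hc] using ih (regs ++ [cur]) []

-- pvAux with empty accumulator skips leading noise elements
theorem pvAux_skip (nv : Int) (l : List (Int × Int)) :
    pvAux nv [] l = pvAux nv [] (l.dropWhile (fun q => !pvKeyB nv q)) := by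
  induction l with
  | nil => rfl
  | cons q t ih =>
    by_cases hq : q.2 ≠ nv
    · simp [List.dropWhile, pvKeyB, hq]
    · simpa [pvAux, List.dropWhile, pvKeyB, hq] using ih

-- pvAux with a nonempty accumulator extends it by the run of non-noise elements
theorem pvAux_pos (nv : Int) (l : List (Int × Int)) :
    ∀ (cur : List (Int × Int)), cur ≠ [] →
    pvAux nv cur l =
      (cur ++ l.takeWhile (pvKeyB nv)) :: pvAux nv [] (l.dropWhile (pvKeyB nv)) := by
  induction l with
  | nil => intro cur hc; simp [pvAux, hc]
  | cons q t ih =>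
    intro cur hc
    by_cases hq : q.2 ≠ nv
    · have := ih (cur ++ [q]) (by simp)
      simp [pvAux, hq, List.takeWhile, List.dropWhile, pvKeyB, this]
    · simp [pvAux, hq, hc, List.takeWhile, List.dropWhile, pvKeyB]

-- B's groupby equals pvAux with empty accumulator (strong induction on length)
theorem pvGroupsB_eq_aux_n (nv : Int) :
    ∀ (n : Nat) (l : List (Int × Int)), l.length ≤ n → pvGroupsB nv l = pvAux nv [] l := by
  intro n
  induction n with
  | zero =>
    intro l hl
    have : l = [] := List.eq_nil_of_length_eq_zero (Nat.le_zero.mp hl)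
    subst this
    simp [pvGroupsB, pvAux]
  | succ n ih =>
    intro l hl
    cases l with
    | nil => simp [pvGroupsB, pvAux]
    | cons p rest =>
      rw [pvGroupsB]
      simp only [List.span_eq_takeWhile_dropWhile]
      by_cases hp : p.2 ≠ nv
      · have hk : pvKeyB nv p = true := by simp [pvKeyB, hp]
        have hpred : (fun q => pvKeyB nv q == true) = (pvKeyB nv) := by
          funext q; simp
        rw [hk, if_pos rfl, hpred]
        rw [ih _ (le_trans (List.length_dropWhile_le _ _) (Nat.le_of_succ_le_succ hl))]
        have hpos := pvAux_pos nv rest [p] (by simp)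
        simp only [pvAux, if_pos hp, List.nil_append] at *
        rw [hpos]; simp
      · have hp' : p.2 = nv := not_not.mp hp
        have hk : pvKeyB nv p = false := by simp [pvKeyB, hp']
        have hpred : (fun q => pvKeyB nv q == false) = (fun q => !pvKeyB nv q) := by
          funext q; simp
        rw [hk, if_neg (by simp), hpred]
        rw [ih _ (le_trans (List.length_dropWhile_le _ _) (Nat.le_of_succ_le_succ hl))]
        rw [← pvAux_skip]
        simp [pvAux, hp']

theorem pvGroupsB_eq_aux (nv : Int) (l : List (Int × Int)) :
    pvGroupsB nv l = pvAux nv [] l :=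
  pvGroupsB_eq_aux_n nv l.length l (le_refl _)

-- ===== VERDICT (by name: the statement is the Claim_ definition above) =====
theorem split_wave_regions_spec : Claim_equal_split_wave_regions := by
  intro data_lead_x noise_value _
  show split_wave_regions data_lead_x noise_value = split_wave_regions_alt data_lead_x noise_value
  rw [split_wave_regions, split_wave_regions_alt, pvGroupsB_eq_aux]
  exact pvA_eq_aux noise_value (PySem.List.enumerate data_lead_x) [] []
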